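-- pv_equiv track=rewrite | github.com/jngmk/Training | Python/Programmers/[2019카카오공채] 징검다리 건너기/solution2.py | solution
-- ===== SOURCE A (Python) =====
-- def check(stones, num, k):
--     impossible = 0
--     for stone in stones:
--         if stone < num:
--             impossible += 1
--         else:
--             impossible = 0
--         if impossible >= k:
--             return False
--     return True
--
-- def solution(stones, k):
--     answer = 1
--     left = 1
--     right = max(stones) + 1
--     while left < right:
--         mid = (left + right) // 2
--         if check(stones, mid, k):
--             answer = mid
--             left = mid + 1
--         else:
--             right = mid
--
--     return answer
-- ===== SOURCE B (Python) =====
-- def solution(stones, k):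
--     n = len(stones)
--     if k > n:
--         m = max(stones)
--     else:
--         m = min(max(stones[i:i + k]) for i in range(n - k + 1))
--     return m if m > 1 else 1
-- ===== Notes on version B (the rewrite author's own statement) =====
-- stated objective: alternative
-- what changed: Replaces the binary search over thresholds (each probe rescanning all stones for a run of k consecutive stones below the threshold) by a direct computation: the answer is the minimum over all windows of k consecutive stones of the window maximum, clamped below by 1.
-- outside the precondition, e.g. on solution([5, 3], 0): A returns 1, B raises ValueError
import Mathlib
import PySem

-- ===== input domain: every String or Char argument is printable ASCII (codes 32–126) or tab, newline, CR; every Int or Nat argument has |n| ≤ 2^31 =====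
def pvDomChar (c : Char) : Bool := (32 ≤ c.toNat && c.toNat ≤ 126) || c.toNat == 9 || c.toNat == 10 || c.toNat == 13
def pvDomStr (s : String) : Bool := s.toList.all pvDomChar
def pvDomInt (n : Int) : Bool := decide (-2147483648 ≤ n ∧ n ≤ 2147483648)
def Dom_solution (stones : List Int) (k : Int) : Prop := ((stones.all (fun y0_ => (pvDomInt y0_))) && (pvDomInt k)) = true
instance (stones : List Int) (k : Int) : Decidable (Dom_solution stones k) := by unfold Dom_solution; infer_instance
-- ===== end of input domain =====

-- B replaces A's binary search on the answer by a direct min-over-windows-of-window-max computation; equivalence of the two is proved below.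

-- ===== PORT A =====
-- the 'for stone in stones' loop of check, with early return False
def checkGo (num k : Int) : List Int → Int → Bool
  | [], _ => true
  | stone :: rest, impossible =>
    let impossible' := if stone < num then impossible + 1 else (0 : Int)
    if impossible' ≥ k then false else checkGo num k rest impossible'

def check (stones : List Int) (num k : Int) : Bool := checkGo num k stones 0

-- the 'while left < right' binary-search loop
def bsGo (stones : List Int) (k : Int) (answer left right : Int) : Int :=
  if h : left < right then
    let mid := PySem.Int.floordiv (left + right) 2
    if check stones mid k then bsGo stones k mid (mid + 1) right
    else bsGo stones k answer left mid
  else answer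
termination_by (right - left).toNat
decreasing_by
  · have he : PySem.Int.floordiv (left + right) 2 = (left + right) / 2 :=
      PySem.Int.floordiv_eq_ediv_of_pos (by norm_num)
    simp only [he]; omega
  · have he : PySem.Int.floordiv (left + right) 2 = (left + right) / 2 :=
      PySem.Int.floordiv_eq_ediv_of_pos (by norm_num)
    simp only [he]; omega

-- max(stones) raises on [], excluded by Pre_; getD 0 is unreachable junk there
def solution (stones : List Int) (k : Int) : Int :=
  bsGo stones k 1 1 ((PySem.List.max? stones (fun x => x)).getD 0 + 1)

-- ===== PORT B =====
def solution_alt (stones : List Int) (k : Int) : Int :=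
  let n : Int := (stones.length : Int)
  let m : Int :=
    if k > n then (PySem.List.max? stones (fun x => x)).getD 0
    else (PySem.List.min? ((PySem.List.pyRange 0 (n - k + 1) 1).map
            (fun i => (PySem.List.max? (PySem.List.slice stones (some i) (some (i + k))) (fun x => x)).getD 0))
            (fun x => x)).getD 0
  if m > 1 then m else 1

-- ===== PRECONDITION & SPEC =====
-- Pre_ excludes empty stones, on which A raises ValueError (max of empty list), and k ≤ 0,
-- a meaningless parameter (k is a positive count of consecutive skippable stones) on which B raises ValueError.
def Pre_solution (stones : List Int) (k : Int) : Prop := stones ≠ [] ∧ 1 ≤ k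
instance (stones : List Int) (k : Int) : Decidable (Pre_solution stones k) := by
  unfold Pre_solution; infer_instance

def pvWitness_solution : List Int × Int := ([2, 4, 5, 3, 2, 1, 4], 3)

def Spec_solution (stones : List Int) (k : Int) (out : Int) : Prop := out = solution_alt stones k
instance (stones : List Int) (k : Int) (out : Int) : Decidable (Spec_solution stones k out) := by
  unfold Spec_solution; infer_instance

-- ===== CLAIM (what is proved, stated in full; the proofs are below) =====
def Claim_equal_solution : Prop := ∀ (stones : List Int) (k : Int), Dom_solution stones k → Pre_solution stones k → Spec_solution stones k (solution stones k)

-- ===== LEMMAS AND PROOFS =====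

-- if fewer than k stones remain (counting the current run), check never fails
theorem checkGo_true_of_short (num k : Int) :
    ∀ (l : List Int) (imp : Int), 0 ≤ imp → imp + l.length < k → checkGo num k l imp = true := by
  intro l
  induction l with
  | nil => intro imp _ _; simp [checkGo]
  | cons s rest ih =>
    intro imp h0 hlen
    simp only [checkGo, List.length_cons] at *
    split_ifs with hs hge hge
    · exfalso; push_cast at hlen; omega
    · exact ih _ (by omega) (by push_cast at hlen ⊢; omega)
    · exfalso; push_cast at hlen; omega
    · exact ih _ (by omega) (by push_cast at hlen ⊢; omega)

-- skipping a good stone: a k-run in (replicate m true ++ false :: X) is a k-run in X (m < k)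
theorem run_skip_false (kn m : ℕ) (hm : m < kn) (X : List Bool) :
    (∃ i, (((List.replicate m true ++ false :: X).drop i).take kn) = List.replicate kn true) ↔
      (∃ j, ((X.drop j).take kn) = List.replicate kn true) := by
  constructor
  · rintro ⟨i, hi⟩
    rw [List.drop_append, List.drop_replicate, List.length_replicate] at hi
    by_cases hcase : i ≤ m
    · exfalso
      have hz : i - m = 0 := by omega
      rw [hz, List.drop_zero] at hi
      have hfalse : false ∈ ((List.replicate (m - i) true ++ false :: X).take kn) := by
        rw [List.take_append, List.take_replicate, List.length_replicate]
        have hmin : min kn (m - i) = m - i := by omega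
        obtain ⟨t, ht⟩ : ∃ t, kn - (m - i) = t + 1 := ⟨kn - (m - i) - 1, by omega⟩
        rw [hmin, ht, List.take_succ_cons]
        exact List.mem_append_right _ (List.mem_cons_self)
      have := (List.eq_replicate_iff.mp hi).2 false hfalse
      simp at this
    · refine ⟨i - m - 1, ?_⟩
      have hz : m - i = 0 := by omega
      obtain ⟨t, ht⟩ : ∃ t, i - m = t + 1 := ⟨i - m - 1, by omega⟩
      rw [hz, ht, List.replicate_zero, List.nil_append, List.drop_succ_cons] at hi
      have : i - m - 1 = t := by omega
      rw [this]
      exact hi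
  · rintro ⟨j, hj⟩
    refine ⟨m + 1 + j, ?_⟩
    rw [List.drop_append, List.drop_replicate, List.length_replicate]
    have h1 : m - (m + 1 + j) = 0 := by omega
    have h2 : m + 1 + j - m = j + 1 := by omega
    rw [h1, h2, List.replicate_zero, List.nil_append, List.drop_succ_cons]
    exact hj

-- checkGo returns false iff the run-prefixed bad-pattern list contains k consecutive 'true's
theorem checkGo_false_iff (num k : Int) (hk : 1 ≤ k) :
    ∀ (l : List Int) (imp : Int), 0 ≤ imp → imp < k →
      (checkGo num k l imp = false ↔
        ∃ i : ℕ, ((List.replicate imp.toNat true ++ l.map (fun x => decide (x < num))).drop i).take k.toNat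
          = List.replicate k.toNat true) := by
  intro l
  induction l with
  | nil =>
    intro imp h0 hik
    simp only [checkGo, List.map_nil, List.append_nil]
    constructor
    · intro h; simp at h
    · rintro ⟨i, hi⟩
      have hlen := congrArg List.length hi
      simp only [List.length_take, List.length_drop, List.length_replicate] at hlen
      omega
  | cons s rest ih =>
    intro imp h0 hik
    simp only [checkGo]
    split_ifs with hs hge hge
    · -- s < num and imp + 1 ≥ k: immediate failure; the run including s has length k
      have hk1 : k.toNat = imp.toNat + 1 := by omega
      refine iff_of_true rfl ⟨0, ?_⟩
      rw [List.drop_zero, List.map_cons, decide_eq_true hs, List.append_cons,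
        ← List.replicate_succ', hk1]
      exact List.take_left' (by simp)
    · -- s < num, run grows by one
      rw [ih (imp + 1) (by omega) (by omega)]
      have hL : List.replicate (imp + 1).toNat true ++ rest.map (fun x => decide (x < num)) =
          List.replicate imp.toNat true ++ (s :: rest).map (fun x => decide (x < num)) := by
        have h1 : (imp + 1).toNat = imp.toNat + 1 := by omega
        rw [h1, List.replicate_succ', List.map_cons, decide_eq_true hs, List.append_cons]
        simp [List.append_assoc]
      rw [hL]
    · exact absurd hge (by omega)
    · -- stone not below num: run resets to 0
      rw [ih 0 le_rfl (by omega)]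
      have hfs : (decide (s < num)) = false := decide_eq_false hs
      simp only [Int.toNat_zero, List.replicate_zero, List.nil_append, List.map_cons, hfs]
      exact (run_skip_false k.toNat imp.toNat (by omega) _).symm

-- when every probe succeeds, the binary search climbs to right - 1
theorem bsGo_alltrue (stones : List Int) (k : Int) (hg : ∀ t, check stones t k = true) :
    ∀ (answer left right : Int), bsGo stones k answer left right = if left < right then right - 1 else answer := by
  intro answer left right
  induction answer, left, right using bsGo.induct stones k with
  | case1 answer left right h mid hc ih =>
    have he : mid = (left + right) / 2 := PySem.Int.floordiv_eq_ediv_of_pos (by norm_num)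
    rw [bsGo]
    simp only [dif_pos h]
    rw [ih]
    split_ifs <;> omega
  | case2 answer left right h mid hc ih =>
    rw [hg mid] at hc; simp at hc
  | case3 answer left right h =>
    rw [bsGo]; simp only [dif_neg h]; rw [if_neg h]

-- threshold search, all-false region: answer is untouched
theorem bsGo_ge (stones : List Int) (k C : Int) (hg : ∀ t, check stones t k = decide (t ≤ C)) :
    ∀ (answer left right : Int), C < left → bsGo stones k answer left right = answer := by
  intro answer left right
  induction answer, left, right using bsGo.induct stones k with
  | case1 answer left right h mid hc ih =>
    intro hC
    have he : mid = (left + right) / 2 := PySem.Int.floordiv_eq_ediv_of_pos (by norm_num)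
    rw [hg mid] at hc
    have : mid ≤ C := of_decide_eq_true hc
    omega
  | case2 answer left right h mid hc ih =>
    intro hC
    rw [bsGo]
    simp only [dif_pos h]
    have hc' : check stones (PySem.Int.floordiv (left + right) 2) k = false := by simp only [Bool.not_eq_true] at hc; exact hc
    simp only [hc', Bool.false_eq_true, if_false]
    exact ih hC
  | case3 answer left right h =>
    intro hC
    rw [bsGo]; simp only [dif_neg h]

-- threshold search, main invariant
theorem bsGo_main (stones : List Int) (k C : Int) (hg : ∀ t, check stones t k = decide (t ≤ C)) :
    ∀ (answer left right : Int), left ≤ C + 1 → C + 1 ≤ right →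
      bsGo stones k answer left right = if left ≤ C then C else answer := by
  intro answer left right
  induction answer, left, right using bsGo.induct stones k with
  | case1 answer left right h mid hc ih =>
    intro h1 h2
    have he : mid = (left + right) / 2 := PySem.Int.floordiv_eq_ediv_of_pos (by norm_num)
    have hmC : mid ≤ C := of_decide_eq_true (by rw [← hg mid]; exact hc)
    rw [bsGo]
    simp only [dif_pos h]
    rw [if_pos hc]
    rw [ih (by omega) (by omega)]
    split_ifs <;> omega
  | case2 answer left right h mid hc ih =>
    intro h1 h2
    have he : mid = (left + right) / 2 := PySem.Int.floordiv_eq_ediv_of_pos (by norm_num)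
    have hmC : ¬ mid ≤ C := by
      intro hle
      rw [hg mid] at hc
      simp [hle] at hc
    have hc' : check stones (PySem.Int.floordiv (left + right) 2) k = false := by simp only [Bool.not_eq_true] at hc; exact hc
    rw [bsGo]
    simp only [dif_pos h, hc', Bool.false_eq_true, if_false]
    exact ih h1 (by omega)
  | case3 answer left right h =>
    intro h1 h2
    rw [bsGo]
    simp only [dif_neg h]
    rw [if_neg (by omega)]

-- t is at most max(l) iff some element of l is at least t (nonempty l)
theorem wmax_le_iff (l : List Int) (hl : l ≠ []) (t : Int) :
    t ≤ (PySem.List.max? l (fun x => x)).getD 0 ↔ ∃ x ∈ l, t ≤ x := by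
  obtain ⟨w, hw⟩ : ∃ w, PySem.List.max? l (fun x => x) = some w := by
    cases h : PySem.List.max? l (fun x => x) with
    | none => exact absurd ((PySem.List.max?_eq_none_iff _ _).mp h) hl
    | some w => exact ⟨w, rfl⟩
  rw [hw, Option.getD_some]
  constructor
  · intro h; exact ⟨w, PySem.List.max?_mem hw, h⟩
  · rintro ⟨x, hx, hxt⟩; exact le_trans hxt (PySem.List.max?_isMax hw x hx)

-- t is at most min(l) iff every element of l is at least t (nonempty l)
theorem min_ge_iff (l : List Int) (hl : l ≠ []) (t : Int) :
    t ≤ (PySem.List.min? l (fun x => x)).getD 0 ↔ ∀ x ∈ l, t ≤ x := by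
  obtain ⟨w, hw⟩ : ∃ w, PySem.List.min? l (fun x => x) = some w := by
    cases h : PySem.List.min? l (fun x => x) with
    | none => exact absurd ((PySem.List.min?_eq_none_iff _ _).mp h) hl
    | some w => exact ⟨w, rfl⟩
  rw [hw, Option.getD_some]
  constructor
  · intro h x hx; exact le_trans h (PySem.List.min?_isMin hw x hx)
  · intro h; exact h w (PySem.List.min?_mem hw)

-- the slice stones[i:i+k] as drop/take, for 0 ≤ i
theorem slice_window (stones : List Int) (k i : Int) (h0 : 0 ≤ i) (hk : 1 ≤ k) :
    PySem.List.slice stones (some i) (some (i + k)) = (stones.drop i.toNat).take k.toNat := by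
  rw [PySem.List.slice_toNat stones h0 (by omega)]
  congr 1
  omega

-- check is the threshold predicate of the min over windows of the window max
theorem check_eq_decide (stones : List Int) (k : Int) (hk : 1 ≤ k) (hkn : k ≤ (stones.length : Int)) (t : Int) :
    check stones t k = decide (t ≤
      (PySem.List.min? ((PySem.List.pyRange 0 ((stones.length : Int) - k + 1) 1).map
        (fun i => (PySem.List.max? (PySem.List.slice stones (some i) (some (i + k))) (fun x => x)).getD 0))
        (fun x => x)).getD 0) := by
  have hkn1 : 1 ≤ k.toNat := by omega
  have hknn : k.toNat ≤ stones.length := by omega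
  -- the window list is nonempty for admissible window starts
  have hwin_ne : ∀ j : ℕ, j + k.toNat ≤ stones.length → (stones.drop j).take k.toNat ≠ [] := by
    intro j hj
    have : ((stones.drop j).take k.toNat).length = k.toNat := by
      simp only [List.length_take, List.length_drop]; omega
    intro hnil; rw [hnil] at this; simp at this; omega
  have hrange_ne : (PySem.List.pyRange 0 ((stones.length : Int) - k + 1) 1).map
      (fun i => (PySem.List.max? (PySem.List.slice stones (some i) (some (i + k))) (fun x => x)).getD 0) ≠ [] := by
    intro hnil
    have := congrArg List.length hnil
    simp only [List.length_map, PySem.List.length_pyRange_one, List.length_nil] at this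
    omega
  -- t ≤ m iff every window of k consecutive stones has an element ≥ t
  have hGood : (t ≤ (PySem.List.min? ((PySem.List.pyRange 0 ((stones.length : Int) - k + 1) 1).map
        (fun i => (PySem.List.max? (PySem.List.slice stones (some i) (some (i + k))) (fun x => x)).getD 0))
        (fun x => x)).getD 0) ↔
      ∀ j : ℕ, j + k.toNat ≤ stones.length → ∃ x ∈ (stones.drop j).take k.toNat, t ≤ x := by
    rw [min_ge_iff _ hrange_ne]
    constructor
    · intro h j hj
      have hmem : ((j : Int) ∈ PySem.List.pyRange 0 ((stones.length : Int) - k + 1) 1) :=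
        PySem.List.mem_pyRange_one.mpr ⟨by positivity, by omega⟩
      have h2 := h _ (List.mem_map_of_mem hmem)
      rw [slice_window stones k _ (by positivity) hk] at h2
      rw [wmax_le_iff _ (by simpa using hwin_ne j hj) t] at h2
      simpa using h2
    · intro h v hv
      obtain ⟨i, hi, rfl⟩ := List.mem_map.mp hv
      obtain ⟨hi0, hi1⟩ := PySem.List.mem_pyRange_one.mp hi
      rw [slice_window stones k i hi0 hk]
      have hj : i.toNat + k.toNat ≤ stones.length := by omega
      rw [wmax_le_iff _ (hwin_ne i.toNat hj) t]
      exact h i.toNat hj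
  -- checkGo failure, per window start
  have hiff : ∀ i : ℕ, (((stones.map (fun x => decide (x < t))).drop i).take k.toNat
        = List.replicate k.toNat true ↔
      (i + k.toNat ≤ stones.length ∧ ∀ x ∈ (stones.drop i).take k.toNat, x < t)) := by
    intro i
    rw [← List.map_drop, ← List.map_take, List.eq_replicate_iff]
    constructor
    · rintro ⟨hlen, hall⟩
      simp only [List.length_map, List.length_take, List.length_drop] at hlen
      refine ⟨by omega, ?_⟩
      intro x hx
      have := hall _ (List.mem_map_of_mem hx)
      simpa using this
    · rintro ⟨hle, hall⟩
      constructor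
      · simp only [List.length_map, List.length_take, List.length_drop]; omega
      · intro b hb
        obtain ⟨x, hx, rfl⟩ := List.mem_map.mp hb
        simpa using hall x hx
  have hfalse : check stones t k = false ↔
      ¬ (t ≤ (PySem.List.min? ((PySem.List.pyRange 0 ((stones.length : Int) - k + 1) 1).map
        (fun i => (PySem.List.max? (PySem.List.slice stones (some i) (some (i + k))) (fun x => x)).getD 0))
        (fun x => x)).getD 0) := by
    rw [check, checkGo_false_iff t k hk stones 0 le_rfl (by omega)]
    rw [hGood]
    simp only [Int.toNat_zero, List.replicate_zero, List.nil_append]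
    push Not
    constructor
    · rintro ⟨i, hi⟩
      obtain ⟨hle, hall⟩ := (hiff i).mp hi
      exact ⟨i, hle, fun x hx => hall x hx⟩
    · rintro ⟨j, hj, hall⟩
      exact ⟨j, (hiff j).mpr ⟨hj, hall⟩⟩
  cases hc : check stones t k with
  | false =>
    have := hfalse.mp hc
    simp [this]
  | true =>
    by_cases hm : t ≤ (PySem.List.min? ((PySem.List.pyRange 0 ((stones.length : Int) - k + 1) 1).map
        (fun i => (PySem.List.max? (PySem.List.slice stones (some i) (some (i + k))) (fun x => x)).getD 0))
        (fun x => x)).getD 0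
    · simp [hm]
    · rw [hfalse.mpr hm] at hc; cases hc

theorem m_le_max (stones : List Int) (k M : Int) (hk : 1 ≤ k) (hkn : k ≤ (stones.length : Int))
    (hM : PySem.List.max? stones (fun x => x) = some M) :
    (PySem.List.min? ((PySem.List.pyRange 0 ((stones.length : Int) - k + 1) 1).map
        (fun i => (PySem.List.max? (PySem.List.slice stones (some i) (some (i + k))) (fun x => x)).getD 0))
        (fun x => x)).getD 0 ≤ M := by
  have hrange_ne : (PySem.List.pyRange 0 ((stones.length : Int) - k + 1) 1).map
      (fun i => (PySem.List.max? (PySem.List.slice stones (some i) (some (i + k))) (fun x => x)).getD 0) ≠ [] := by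
    intro hnil
    have := congrArg List.length hnil
    simp only [List.length_map, PySem.List.length_pyRange_one, List.length_nil] at this
    omega
  obtain ⟨m₀, hm₀⟩ : ∃ m₀, PySem.List.min? ((PySem.List.pyRange 0 ((stones.length : Int) - k + 1) 1).map
      (fun i => (PySem.List.max? (PySem.List.slice stones (some i) (some (i + k))) (fun x => x)).getD 0))
      (fun x => x) = some m₀ := by
    cases h : PySem.List.min? ((PySem.List.pyRange 0 ((stones.length : Int) - k + 1) 1).map
        (fun i => (PySem.List.max? (PySem.List.slice stones (some i) (some (i + k))) (fun x => x)).getD 0))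
        (fun x => x) with
    | none => exact absurd ((PySem.List.min?_eq_none_iff _ _).mp h) hrange_ne
    | some w => exact ⟨w, rfl⟩
  rw [hm₀, Option.getD_some]
  have hmem := PySem.List.min?_mem hm₀
  obtain ⟨i, hi, hw⟩ := List.mem_map.mp hmem
  obtain ⟨hi0, hi1⟩ := PySem.List.mem_pyRange_one.mp hi
  rw [slice_window stones k i hi0 hk] at hw
  have hwne : (stones.drop i.toNat).take k.toNat ≠ [] := by
    have : ((stones.drop i.toNat).take k.toNat).length = k.toNat := by
      simp only [List.length_take, List.length_drop]; omega
    intro hnil; rw [hnil] at this; simp at this; omega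
  obtain ⟨w, hwm⟩ : ∃ w, PySem.List.max? ((stones.drop i.toNat).take k.toNat) (fun x => x) = some w := by
    cases h : PySem.List.max? ((stones.drop i.toNat).take k.toNat) (fun x => x) with
    | none => exact absurd ((PySem.List.max?_eq_none_iff _ _).mp h) hwne
    | some w => exact ⟨w, rfl⟩
  rw [hwm, Option.getD_some] at hw
  subst hw
  have hwin : w ∈ stones := List.mem_of_mem_drop (List.mem_of_mem_take (PySem.List.max?_mem hwm))
  exact PySem.List.max?_isMax hM w hwin

-- ===== VERDICT (by name: the statement is the Claim_ definition above) =====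
theorem solution_spec : Claim_equal_solution := by
  intro stones k _ hpre
  obtain ⟨hne, hk⟩ := hpre
  unfold Spec_solution
  obtain ⟨M, hM⟩ : ∃ M, PySem.List.max? stones (fun x => x) = some M := by
    cases h : PySem.List.max? stones (fun x => x) with
    | none => exact absurd ((PySem.List.max?_eq_none_iff _ _).mp h) hne
    | some w => exact ⟨w, rfl⟩
  unfold solution solution_alt
  rw [hM]
  simp only [Option.getD_some]
  by_cases hbig : k > (stones.length : Int)
  · rw [if_pos hbig]
    have hg : ∀ t, check stones t k = true := by
      intro t
      exact checkGo_true_of_short t k stones 0 le_rfl (by omega)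
    rw [bsGo_alltrue stones k hg 1 1 (M + 1)]
    split_ifs <;> omega
  · rw [if_neg hbig]
    have hcd := check_eq_decide stones k hk (by omega)
    have hle := m_le_max stones k M hk (by omega) hM
    by_cases hm : 1 ≤ (PySem.List.min? ((PySem.List.pyRange 0 ((stones.length : Int) - k + 1) 1).map
        (fun i => (PySem.List.max? (PySem.List.slice stones (some i) (some (i + k))) (fun x => x)).getD 0))
        (fun x => x)).getD 0
    · rw [bsGo_main stones k _ hcd 1 1 (M + 1) (by omega) (by omega)]
      split_ifs <;> omega
    · rw [bsGo_ge stones k _ hcd 1 1 (M + 1) (by omega)]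
      split_ifs <;> omega
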